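-- pv_equiv track=rewrite | github.com/janniswi00/master_clean | functions.py | get_bases_from_segments
-- ===== SOURCE A (Python) =====
-- barcode_dict = {"PB2": "AGC", "PB1": "CGC", "PA": "GGC", "HA": "TAC", "NP": "TCC", "NA": "TTC", "M" :"TGA", "NS": "TGT"}
--
-- def get_bases_from_segments(segments:str) -> str:
--     """Returns the bases of a viral segment.
--
--     Args:
--         segments (str): viral segment
--
--     Returns:
--         str: bases
--     """
--     if segments == "None":
--         return
--     if "invalid" in segments or "missing" in segments:
--         return "invalid"
--     segments = segments.split(",")
--     bases_man = ""
--     bases_pipe = ""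
--     bases3 = ""
--     for seg in segments:
--         if str(barcode_dict[seg][0]) not in bases_man:
--             bases_man += barcode_dict[seg][0]
--         if str(barcode_dict[seg][1]) not in bases_pipe:
--             bases_pipe += barcode_dict[seg][1]
--         if str(barcode_dict[seg][2]) not in bases3:
--             bases3 += barcode_dict[seg][2]
--     return bases_man + "," + bases_pipe + "," + bases3
-- ===== SOURCE B (Python) =====
-- barcode_dict = {"PB2": "AGC", "PB1": "CGC", "PA": "GGC", "HA": "TAC", "NP": "TCC", "NA": "TTC", "M" :"TGA", "NS": "TGT"}
--
-- def get_bases_from_segments(segments: str) -> str: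
--     """Returns the bases of a viral segment (column-wise rebuild)."""
--     if segments == "None":
--         return
--     if "invalid" in segments or "missing" in segments:
--         return "invalid"
--     segs = segments.split(",")
--     return ",".join(
--         "".join(dict.fromkeys(barcode_dict[s][i] for s in segs))
--         for i in range(3)
--     )
-- ===== Notes on version B (the rewrite author's own statement) =====
-- stated objective: simpler
-- what changed: A's single pass updating three membership-tested accumulator strings is replaced by three independent column-wise passes: for each position i, dict.fromkeys over the i-th base of every segment gives the ordered-dedup column, and the three columns are joined with ','.
import Mathlib
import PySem

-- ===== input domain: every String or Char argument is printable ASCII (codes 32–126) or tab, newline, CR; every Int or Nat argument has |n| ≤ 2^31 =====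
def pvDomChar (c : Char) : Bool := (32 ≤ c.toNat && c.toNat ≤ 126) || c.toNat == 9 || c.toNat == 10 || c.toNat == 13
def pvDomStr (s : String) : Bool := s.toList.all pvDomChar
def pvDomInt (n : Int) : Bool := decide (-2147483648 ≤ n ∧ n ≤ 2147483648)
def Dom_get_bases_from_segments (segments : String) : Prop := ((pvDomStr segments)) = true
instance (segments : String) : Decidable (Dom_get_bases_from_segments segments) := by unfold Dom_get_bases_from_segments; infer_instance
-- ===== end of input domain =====

-- B rebuilds the result column by column (dict.fromkeys per position) instead of A's
-- single pass over the segments updating three membership-tested accumulator strings.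

-- ===== PORT A =====
-- barcode_dict (shared module-level constant of both programs; strings as char lists)
def pvBD : PySem.Dict (List Char) (List Char) :=
  PySem.Dict.ofList [("PB2".toList,"AGC".toList),("PB1".toList,"CGC".toList),
                     ("PA".toList,"GGC".toList),("HA".toList,"TAC".toList),
                     ("NP".toList,"TCC".toList),("NA".toList,"TTC".toList),
                     ("M".toList,"TGA".toList),("NS".toList,"TGT".toList)]

-- loop body of A: update the three accumulators for one segment; none = KeyError
def pvStepA (st : Option (List Char × List Char × List Char)) (seg : List Char) :
    Option (List Char × List Char × List Char) :=
  match st with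
  | none => none
  | some (m, p, t) =>
    match PySem.Dict.get? pvBD seg with
    | none => none
    | some b =>
      match PySem.List.pyGet? b 0, PySem.List.pyGet? b 1, PySem.List.pyGet? b 2 with
      | some c0, some c1, some c2 =>
        some ((if PySem.Chars.isIn [c0] m then m else m ++ [c0]),
              (if PySem.Chars.isIn [c1] p then p else p ++ [c1]),
              (if PySem.Chars.isIn [c2] t then t else t ++ [c2]))
      | _, _, _ => none

def get_bases_from_segments (segments : String) : Option String :=
  if segments = "None" then none
  else if PySem.Str.isIn "invalid" segments || PySem.Str.isIn "missing" segments then some "invalid"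
  else
    match (PySem.Chars.splitOn segments.toList [',']).foldl pvStepA (some ([], [], [])) with
    | none => none
    | some (m, p, t) => some (String.ofList (m ++ [','] ++ p ++ [','] ++ t))

-- ===== PORT B =====
-- the generator (barcode_dict[s][i] for s in segs); none = KeyError
def pvColChars (segs : List (List Char)) (i : Int) : Option (List Char) :=
  match segs with
  | [] => some []
  | s :: rest =>
    match PySem.Dict.get? pvBD s with
    | none => none
    | some b =>
      match PySem.List.pyGet? b i with
      | none => none
      | some c =>
        match pvColChars rest i with
        | none => none
        | some cs => some (c :: cs)

-- "".join(dict.fromkeys(...)) for one column i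
def pvCol (segs : List (List Char)) (i : Int) : Option (List Char) :=
  (pvColChars segs i).map PySem.List.dedup

def get_bases_from_segments_alt (segments : String) : Option String :=
  if segments = "None" then none
  else if PySem.Str.isIn "invalid" segments || PySem.Str.isIn "missing" segments then some "invalid"
  else
    let segs := PySem.Chars.splitOn segments.toList [',']
    match pvCol segs 0, pvCol segs 1, pvCol segs 2 with
    | some c0, some c1, some c2 => some (String.ofList (PySem.Chars.join [','] [c0, c1, c2]))
    | _, _, _ => none

-- ===== PRECONDITION & SPEC =====
-- Pre_ excludes exactly the inputs where Python A raises KeyError: some comma-separated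
-- piece is not a key of barcode_dict (and none of the early-return guards fires).
def Pre_get_bases_from_segments (segments : String) : Prop :=
  segments = "None" ∨ PySem.Str.isIn "invalid" segments = true ∨
  PySem.Str.isIn "missing" segments = true ∨
  ∀ seg ∈ PySem.Chars.splitOn segments.toList [','],
    seg ∈ ["PB2".toList,"PB1".toList,"PA".toList,"HA".toList,
           "NP".toList,"NA".toList,"M".toList,"NS".toList]

instance (segments : String) : Decidable (Pre_get_bases_from_segments segments) := by
  unfold Pre_get_bases_from_segments; infer_instance

def pvWitness_get_bases_from_segments : String := "PB2,HA,NS"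

def Spec_get_bases_from_segments (segments : String) (out : Option String) : Prop :=
  out = get_bases_from_segments_alt segments
instance (segments : String) (out : Option String) : Decidable (Spec_get_bases_from_segments segments out) := by
  unfold Spec_get_bases_from_segments; infer_instance

-- ===== CLAIM (what is proved, stated in full; the proofs are below) =====
def Claim_equal_get_bases_from_segments : Prop := ∀ (segments : String), Dom_get_bases_from_segments segments → Pre_get_bases_from_segments segments → Spec_get_bases_from_segments segments (get_bases_from_segments segments)

-- ===== LEMMAS AND PROOFS =====

def pvKeys : List (List Char) :=
  ["PB2".toList,"PB1".toList,"PA".toList,"HA".toList,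
   "NP".toList,"NA".toList,"M".toList,"NS".toList]

-- a 1-character substring test is char membership, i.e. Set.contains
theorem pv_isIn_singleton (c : Char) (a : List Char) :
    PySem.Chars.isIn [c] a = PySem.Set.contains a c := by
  by_cases hm : c ∈ a
  · rw [(PySem.Chars.isIn_iff_infix [c] a).mpr ((List.singleton_infix_iff c a).mpr hm)]
    exact ((PySem.Set.contains_iff a c).mpr hm).symm
  · rw [(PySem.Chars.isIn_eq_false_iff [c] a).mpr (fun h => hm ((List.singleton_infix_iff c a).mp h))]
    rcases h : PySem.Set.contains a c with _ | _
    · rfl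
    · exact absurd ((PySem.Set.contains_iff a c).mp h) hm

-- A's accumulator update is Set.add
theorem pv_step_eq_add (a : List Char) (c : Char) :
    (if PySem.Chars.isIn [c] a then a else a ++ [c]) = PySem.Set.add a c := by
  rw [pv_isIn_singleton]; rfl

-- one step of A's loop when the lookups succeed
theorem pv_stepA_lit (m p t : List Char) (s b : List Char)
    (hb : PySem.Dict.get? pvBD s = some b) (c0 c1 c2 : Char)
    (h0 : PySem.List.pyGet? b 0 = some c0) (h1 : PySem.List.pyGet? b 1 = some c1)
    (h2 : PySem.List.pyGet? b 2 = some c2) :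
    pvStepA (some (m, p, t)) s =
      some (PySem.Set.add m c0, PySem.Set.add p c1, PySem.Set.add t c2) := by
  simp only [pvStepA, hb, h0, h1, h2]
  rw [pv_step_eq_add, pv_step_eq_add, pv_step_eq_add]

-- chars extracted per key (total helper for the proof)
def pvChar (s : List Char) (i : Int) : Char :=
  (PySem.List.pyGet? ((PySem.Dict.get? pvBD s).getD []) i).getD 'A'

theorem pv_stepA_key (m p t : List Char) (s : List Char) (hs : s ∈ pvKeys) :
    pvStepA (some (m, p, t)) s =
      some (PySem.Set.add m (pvChar s 0), PySem.Set.add p (pvChar s 1), PySem.Set.add t (pvChar s 2)) := by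
  have hb : PySem.Dict.get? pvBD s = some ((PySem.Dict.get? pvBD s).getD []) := by
    fin_cases hs <;> rfl
  have h0 : PySem.List.pyGet? ((PySem.Dict.get? pvBD s).getD []) 0 = some (pvChar s 0) := by
    fin_cases hs <;> rfl
  have h1 : PySem.List.pyGet? ((PySem.Dict.get? pvBD s).getD []) 1 = some (pvChar s 1) := by
    fin_cases hs <;> rfl
  have h2 : PySem.List.pyGet? ((PySem.Dict.get? pvBD s).getD []) 2 = some (pvChar s 2) := by
    fin_cases hs <;> rfl
  exact pv_stepA_lit m p t s _ hb _ _ _ h0 h1 h2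

-- A's fold over the segments = three independent Set.update folds
theorem pv_foldA (segs : List (List Char)) (h : ∀ s ∈ segs, s ∈ pvKeys) (m p t : List Char) :
    segs.foldl pvStepA (some (m, p, t)) =
      some (PySem.Set.update m (segs.map (pvChar · 0)),
            PySem.Set.update p (segs.map (pvChar · 1)),
            PySem.Set.update t (segs.map (pvChar · 2))) := by
  induction segs generalizing m p t with
  | nil => rfl
  | cons s rest ih =>
    have hs : s ∈ pvKeys := h s (by simp)
    have hrest : ∀ x ∈ rest, x ∈ pvKeys := fun x hx => h x (by simp [hx])
    simp only [List.foldl_cons, pv_stepA_key m p t s hs, List.map_cons]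
    rw [ih hrest]
    rfl

-- one step of B's generator when the lookups succeed
theorem pv_colChars_cons (s : List Char) (rest : List (List Char)) (i : Int) (b : List Char)
    (hb : PySem.Dict.get? pvBD s = some b) (c : Char) (hc : PySem.List.pyGet? b i = some c) :
    pvColChars (s :: rest) i = (pvColChars rest i).map (c :: ·) := by
  simp only [pvColChars, hb, hc]
  cases pvColChars rest i <;> rfl

theorem pv_colChars_key (segs : List (List Char)) (h : ∀ s ∈ segs, s ∈ pvKeys)
    (i : Int) (hi : i = 0 ∨ i = 1 ∨ i = 2) :
    pvColChars segs i = some (segs.map (pvChar · i)) := by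
  induction segs with
  | nil => rfl
  | cons s rest ih =>
    have hs : s ∈ pvKeys := h s (by simp)
    have hrest : ∀ x ∈ rest, x ∈ pvKeys := fun x hx => h x (by simp [hx])
    have hb : PySem.Dict.get? pvBD s = some ((PySem.Dict.get? pvBD s).getD []) := by
      fin_cases hs <;> rfl
    have hc : PySem.List.pyGet? ((PySem.Dict.get? pvBD s).getD []) i = some (pvChar s i) := by
      fin_cases hs <;> rcases hi with rfl | rfl | rfl <;> rfl
    rw [List.map_cons, pv_colChars_cons s rest i _ hb _ hc, ih hrest]
    rfl

-- ===== VERDICT (by name: the statement is the Claim_ definition above) =====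
theorem get_bases_from_segments_spec : Claim_equal_get_bases_from_segments := by
  unfold Claim_equal_get_bases_from_segments
  intro segments _ hpre
  unfold Spec_get_bases_from_segments get_bases_from_segments get_bases_from_segments_alt
  split_ifs with h1 h2
  · rfl
  · rfl
  · have hkeys : ∀ s ∈ PySem.Chars.splitOn segments.toList [','], s ∈ pvKeys := by
      rcases hpre with h | h | h | h
      · exact absurd h h1
      · exact absurd (by rw [Bool.or_eq_true]; exact Or.inl h) h2
      · exact absurd (by rw [Bool.or_eq_true]; exact Or.inr h) h2
      · exact h
    simp only [pvCol]
    rw [pv_foldA _ hkeys [] [] [],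
        pv_colChars_key _ hkeys 0 (by norm_num),
        pv_colChars_key _ hkeys 1 (by norm_num),
        pv_colChars_key _ hkeys 2 (by norm_num)]
    simp only [Option.map_some]
    have hset : ∀ l : List Char, PySem.Set.update [] l = PySem.List.dedup l := by
      intro l
      rw [PySem.List.dedup_eq_ofList, PySem.Set.ofList_eq_foldl]; rfl
    rw [hset, hset, hset]
    have hj : ∀ A B C : List Char,
        PySem.Chars.join [','] [A, B, C] = A ++ [','] ++ B ++ [','] ++ C := by
      intro A B C
      simp [PySem.Chars.join, List.intercalate, List.intersperse, List.append_assoc]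
    rw [hj]
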